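-- pv_equiv track=rewrite | github.com/TsubasaTakeda/TNPandMS_experCode | TNPandMS_lib/Network/reviseNet_origNodes.py | make_orig_incDict
-- ===== SOURCE A (Python) =====
-- def make_orig_incDict(nodes, orig_nodes):
--
--     incDict = {}
--     start_id = 1
--     for i in range(1, len(nodes)+1):
--         if i in orig_nodes:
--             incDict[start_id] = i
--             start_id += 1
--
--     for i in range(1, len(nodes)+1):
--         if i not in list(incDict.values()):
--             incDict[start_id] = i
--             start_id += 1
--
--     return incDict
-- ===== SOURCE B (Python) =====
-- def make_orig_incDict(nodes, orig_nodes):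
--     origs = set(orig_nodes)
--     order = sorted(range(1, len(nodes) + 1), key=lambda i: i not in origs)
--     return dict(enumerate(order, start=1))
-- ===== Notes on version B (the rewrite author's own statement) =====
-- stated objective: faster
-- what changed: Replaces A's two counter-driven passes (the second rescanning list(incDict.values()) for every i) with one stable sort of range(1, n+1) on the boolean key 'i not in set(orig_nodes)' followed by dict(enumerate(order, start=1)).
import Mathlib
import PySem

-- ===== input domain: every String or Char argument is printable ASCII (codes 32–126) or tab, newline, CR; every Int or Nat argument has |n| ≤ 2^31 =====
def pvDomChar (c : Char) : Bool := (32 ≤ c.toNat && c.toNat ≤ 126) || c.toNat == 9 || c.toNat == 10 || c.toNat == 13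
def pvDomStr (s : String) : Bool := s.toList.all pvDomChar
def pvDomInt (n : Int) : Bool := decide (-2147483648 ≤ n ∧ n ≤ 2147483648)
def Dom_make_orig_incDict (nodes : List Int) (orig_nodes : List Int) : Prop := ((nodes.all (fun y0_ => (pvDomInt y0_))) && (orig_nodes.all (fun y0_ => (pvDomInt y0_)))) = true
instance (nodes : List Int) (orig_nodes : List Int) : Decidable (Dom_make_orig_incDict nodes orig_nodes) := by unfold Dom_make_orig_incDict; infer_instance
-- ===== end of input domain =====

-- B replaces A's two counter-driven scans (the second rescanning dict.values() each step) by one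
-- stable sort of 1..n on the boolean key "not an origin node" followed by dict(enumerate(…, 1));
-- objective: faster (no O(n) values() scan per element) and more idiomatic.

-- ===== PORT A =====
def make_orig_incDict (nodes : List Int) (orig_nodes : List Int) : List (Int × Int) :=
  -- incDict = {}; start_id = 1; first loop: origin nodes
  let st1 := (PySem.List.pyRange 1 ((nodes.length : Int) + 1)).foldl
    (fun (acc : PySem.Dict Int Int × Int) i =>
      if i ∈ orig_nodes then (acc.1.insert acc.2 i, acc.2 + 1) else acc)
    (PySem.Dict.empty, 1)
  -- second loop: nodes not yet among incDict.values()
  let st2 := (PySem.List.pyRange 1 ((nodes.length : Int) + 1)).foldl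
    (fun (acc : PySem.Dict Int Int × Int) i =>
      if i ∉ acc.1.values then (acc.1.insert acc.2 i, acc.2 + 1) else acc)
    st1
  st2.1.items

-- ===== PORT B =====
def make_orig_incDict_alt (nodes : List Int) (orig_nodes : List Int) : List (Int × Int) :=
  let origs : PySem.Set Int := PySem.Set.ofList orig_nodes
  let order := PySem.List.sorted (PySem.List.pyRange 1 ((nodes.length : Int) + 1))
    (fun i => !(PySem.Set.contains origs i))   -- key: i not in origs (False < True)
  (PySem.Dict.ofList (PySem.List.enumerate order 1)).items

-- ===== PRECONDITION & SPEC =====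
def Spec_make_orig_incDict (nodes : List Int) (orig_nodes : List Int) (out : List (Int × Int)) : Prop := out = make_orig_incDict_alt nodes orig_nodes
instance (nodes : List Int) (orig_nodes : List Int) (out : List (Int × Int)) : Decidable (Spec_make_orig_incDict nodes orig_nodes out) := by unfold Spec_make_orig_incDict; infer_instance

-- ===== CLAIM (what is proved, stated in full; the proofs are below) =====
def Claim_equal_make_orig_incDict : Prop := ∀ (nodes : List Int) (orig_nodes : List Int), Dom_make_orig_incDict nodes orig_nodes → Spec_make_orig_incDict nodes orig_nodes (make_orig_incDict nodes orig_nodes)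

-- ===== LEMMAS AND PROOFS =====

-- enumerate unrolled on the right
theorem enumerate_append_singleton (vs : List Int) (y : Int) (s : Int) :
    PySem.List.enumerate (vs ++ [y]) s = PySem.List.enumerate vs s ++ [(s + vs.length, y)] := by
  induction vs generalizing s with
  | nil => simp [PySem.List.enumerate]
  | cons x t ih =>
      simp [PySem.List.enumerate, ih (s + 1)]
      ring_nf

theorem map_snd_enumerate (vs : List Int) (s : Int) :
    (PySem.List.enumerate vs s).map (fun p => p.2) = vs := by
  induction vs generalizing s with
  | nil => rfl
  | cons x t ih => simp [PySem.List.enumerate, ih (s + 1)]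

theorem enumerate_key_bounds (vs : List Int) (s : Int) :
    ∀ p ∈ PySem.List.enumerate vs s, s ≤ p.1 ∧ p.1 < s + vs.length := by
  induction vs generalizing s with
  | nil => simp [PySem.List.enumerate]
  | cons x t ih =>
      intro p hp
      simp only [PySem.List.enumerate, List.mem_cons] at hp
      rcases hp with h | h
      · subst h
        show s ≤ s ∧ s < s + ((x :: t).length : Int)
        simp only [List.length_cons]
        omega
      · have := ih (s + 1) p h
        simp only [List.length_cons]
        omega

theorem contains_enumerate_top (vs : List Int) :
    (PySem.Dict.mk (PySem.List.enumerate vs 1) : PySem.Dict Int Int).contains (1 + vs.length) = false := by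
  simp only [PySem.Dict.contains, List.any_eq_false]
  intro p hp
  have := enumerate_key_bounds vs 1 p hp
  simp only [beq_iff_eq]
  omega

theorem insert_enumerate_top (vs : List Int) (y : Int) :
    (PySem.Dict.mk (PySem.List.enumerate vs 1) : PySem.Dict Int Int).insert (1 + vs.length) y
      = PySem.Dict.mk (PySem.List.enumerate (vs ++ [y]) 1) := by
  unfold PySem.Dict.insert
  rw [contains_enumerate_top]
  simp [enumerate_append_singleton]

-- loop 1 invariant
theorem loop1_inv (orig_nodes : List Int) (xs vs : List Int) :
    xs.foldl (fun (acc : PySem.Dict Int Int × Int) i =>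
        if i ∈ orig_nodes then (acc.1.insert acc.2 i, acc.2 + 1) else acc)
      (PySem.Dict.mk (PySem.List.enumerate vs 1), 1 + (vs.length : Int))
    = (PySem.Dict.mk (PySem.List.enumerate (vs ++ xs.filter (fun i => decide (i ∈ orig_nodes))) 1),
       1 + ((vs ++ xs.filter (fun i => decide (i ∈ orig_nodes))).length : Int)) := by
  induction xs generalizing vs with
  | nil => simp
  | cons x t ih =>
      by_cases hx : x ∈ orig_nodes
      · simp only [List.foldl_cons, if_pos hx, insert_enumerate_top]
        have harg : (1 : Int) + (vs.length : Int) + 1 = 1 + (((vs ++ [x]).length : Nat) : Int) := by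
          simp; ring
        rw [harg, ih (vs ++ [x])]
        simp only [List.filter_cons, hx, decide_true, if_true, List.append_assoc,
          List.singleton_append]
      · simp only [List.foldl_cons, if_neg hx]
        rw [ih vs]
        simp [hx]

-- loop 2 invariant: condition "i in values" decided by orig-membership, fresh ids appended
theorem loop2_inv (orig_nodes : List Int) (xs vs : List Int) (hnd : xs.Nodup)
    (h : ∀ i ∈ xs, (i ∈ vs ↔ i ∈ orig_nodes)) :
    xs.foldl (fun (acc : PySem.Dict Int Int × Int) i =>
        if i ∉ acc.1.values then (acc.1.insert acc.2 i, acc.2 + 1) else acc)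
      (PySem.Dict.mk (PySem.List.enumerate vs 1), 1 + (vs.length : Int))
    = (PySem.Dict.mk (PySem.List.enumerate (vs ++ xs.filter (fun i => !decide (i ∈ orig_nodes))) 1),
       1 + ((vs ++ xs.filter (fun i => !decide (i ∈ orig_nodes))).length : Int)) := by
  induction xs generalizing vs with
  | nil => simp
  | cons x t ih =>
      have hvals : (PySem.Dict.mk (PySem.List.enumerate vs 1) : PySem.Dict Int Int).values = vs := by
        simp only [PySem.Dict.values]
        exact map_snd_enumerate vs 1
      have hx := h x (by simp)
      rcases List.nodup_cons.mp hnd with ⟨hxt, hndt⟩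
      by_cases hmem : x ∈ orig_nodes
      · have hin : x ∈ vs := hx.mpr hmem
        have hcond : ¬ (x ∉ (PySem.Dict.mk (PySem.List.enumerate vs 1) : PySem.Dict Int Int).values) := by
          simp [hvals, hin]
        simp only [List.foldl_cons, if_neg hcond]
        rw [ih vs hndt (fun i hi => h i (by simp [hi]))]
        simp [hmem]
      · have hout : x ∉ vs := fun hc => hmem (hx.mp hc)
        have hcond : x ∉ (PySem.Dict.mk (PySem.List.enumerate vs 1) : PySem.Dict Int Int).values := by
          simp [hvals, hout]
        simp only [List.foldl_cons, if_pos hcond, insert_enumerate_top]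
        have harg : (1 : Int) + (vs.length : Int) + 1 = 1 + (((vs ++ [x]).length : Nat) : Int) := by
          simp; ring
        rw [harg, ih (vs ++ [x]) hndt (fun i hi => by
          have := h i (by simp [hi])
          have hne : i ≠ x := fun he => hxt (he ▸ hi)
          simp [this, hne])]
        simp only [List.filter_cons, hmem, decide_false, Bool.not_false, if_true,
          List.append_assoc, List.singleton_append]

-- the range 1..n is duplicate-free
theorem nodup_pyRange_nat (n : Nat) : (PySem.List.pyRange 1 ((n : Int) + 1)).Nodup := by
  induction n with
  | zero => decide
  | succ m ih =>
      rw [show ((m + 1 : Nat) : Int) + 1 = ((m : Int) + 1) + 1 by push_cast; ring,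
        PySem.List.pyRange_one_succ_right (by omega)]
      refine List.Nodup.append ih (by simp) ?_
      intro a ha hb
      have := PySem.List.mem_pyRange_one.mp ha
      simp at hb
      omega

-- stable sort with a Bool key partitions: false-keyed elements first, in order
theorem insertBy_partition (before : Int → Int → Bool) (x : Int) (f0 t0 : List Int)
    (h1 : ∀ y ∈ f0, before x y = false) (h2 : ∀ y ∈ t0, before x y = true) :
    PySem.List.insertBy before x (f0 ++ t0) = f0 ++ x :: t0 := by
  induction f0 with
  | nil =>
      cases t0 with
      | nil => rfl
      | cons y ys => simp [PySem.List.insertBy, h2 y (by simp)]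
  | cons y ys ih =>
      simp only [List.cons_append, PySem.List.insertBy, h1 y (by simp), Bool.false_eq_true,
        if_false]
      rw [ih (fun z hz => h1 z (by simp [hz])) ]

theorem foldl_insertBy_bool_key (key : Int → Bool) (xs f0 t0 : List Int)
    (hf : ∀ y ∈ f0, key y = false) (ht : ∀ y ∈ t0, key y = true) :
    xs.foldl (fun acc x => PySem.List.insertBy (fun a b => decide (key a < key b)) x acc) (f0 ++ t0)
    = (f0 ++ xs.filter (fun x => !key x)) ++ (t0 ++ xs.filter key) := by
  induction xs generalizing f0 t0 with
  | nil => simp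
  | cons x t ih =>
      by_cases hx : key x = true
      · have : PySem.List.insertBy (fun a b => decide (key a < key b)) x (f0 ++ t0)
            = (f0 ++ t0) ++ [x] := by
          apply PySem.List.insertBy_of_forall_not_before
          intro y hy
          rcases List.mem_append.mp hy with h | h
          · simp [hx, hf y h]
          · simp [hx, ht y h]
        have ht' : ∀ y ∈ t0 ++ [x], key y = true := by
          intro y hy
          rcases List.mem_append.mp hy with h | h
          · exact ht y h
          · simp at h; subst h; exact hx
        simp only [List.foldl_cons, this, List.append_assoc]
        rw [ih f0 (t0 ++ [x]) hf ht']
        simp [hx, List.append_assoc]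
      · have hx' : key x = false := by simpa using hx
        have : PySem.List.insertBy (fun a b => decide (key a < key b)) x (f0 ++ t0)
            = f0 ++ x :: t0 := by
          apply insertBy_partition
          · intro y hy; simp [hx', hf y hy]
          · intro y hy; simp [hx', ht y hy]
        simp only [List.foldl_cons, this]
        have hf' : ∀ y ∈ f0 ++ [x], key y = false := by
          intro y hy
          rcases List.mem_append.mp hy with h | h
          · exact hf y h
          · simp at h; subst h; exact hx'
        rw [show f0 ++ x :: t0 = (f0 ++ [x]) ++ t0 by simp]
        rw [ih (f0 ++ [x]) t0 hf' ht]
        simp [hx', List.append_assoc]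

theorem sorted_bool_key (key : Int → Bool) (xs : List Int) :
    PySem.List.sorted xs key = xs.filter (fun x => !key x) ++ xs.filter key := by
  have := foldl_insertBy_bool_key key xs [] [] (by simp) (by simp)
  simpa [PySem.List.sorted_eq_foldl_insertBy] using this

-- dict(pairs) with duplicate-free keys keeps the pair list as items
theorem dict_update_fresh (d : PySem.Dict Int Int) (ps : List (Int × Int))
    (h : ∀ p ∈ ps, d.contains p.1 = false) (hnd : (ps.map Prod.fst).Nodup) :
    (d.update ps).items = d.items ++ ps := by
  induction ps generalizing d with
  | nil => simp [PySem.Dict.update]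
  | cons p t ih =>
      have hins : d.insert p.1 p.2 = PySem.Dict.mk (d.items ++ [p]) := by
        simp [PySem.Dict.insert, h p (by simp)]
      simp only [PySem.Dict.update, List.foldl_cons] at ih ⊢
      rw [hins, ih]
      · simp
      · intro q hq
        have h1 := h q (by simp [hq])
        have hne : ¬ (p.1 == q.1) := by
          simp only [List.map_cons, List.nodup_cons] at hnd
          simp only [beq_iff_eq]
          intro he
          exact hnd.1 (he ▸ List.mem_map_of_mem hq)
        simp only [PySem.Dict.contains, List.any_append, List.any_cons, List.any_nil] at h1 ⊢
        simp [h1, hne]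
      · simp only [List.map_cons, List.nodup_cons] at hnd
        exact hnd.2

theorem nodup_enumerate_keys (vs : List Int) (s : Int) :
    ((PySem.List.enumerate vs s).map Prod.fst).Nodup := by
  induction vs generalizing s with
  | nil => simp [PySem.List.enumerate]
  | cons x t ih =>
      simp only [PySem.List.enumerate, List.map_cons, List.nodup_cons]
      refine ⟨?_, ih (s + 1)⟩
      intro hc
      rcases List.mem_map.mp hc with ⟨p, hp, hps⟩
      have := enumerate_key_bounds t (s + 1) p hp
      omega

-- ===== VERDICT (by name: the statement is the Claim_ definition above) =====
theorem make_orig_incDict_spec : Claim_equal_make_orig_incDict := by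
  intro nodes orig_nodes _
  unfold Spec_make_orig_incDict make_orig_incDict make_orig_incDict_alt
  set r := PySem.List.pyRange 1 ((nodes.length : Int) + 1) with hr
  have hnd : r.Nodup := nodup_pyRange_nat nodes.length
  -- A's result
  have h1 := loop1_inv orig_nodes r []
  simp only [List.nil_append, List.length_nil, Nat.cast_zero, add_zero] at h1
  have hemp : (PySem.Dict.empty : PySem.Dict Int Int) = PySem.Dict.mk (PySem.List.enumerate [] 1) := rfl
  have h2 := loop2_inv orig_nodes r (r.filter (fun i => decide (i ∈ orig_nodes))) hnd
    (fun i hi => by simp [List.mem_filter, hi])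
  simp only [hemp, h1, h2]
  -- B's result
  have hkey : (fun i => !(PySem.Set.contains (PySem.Set.ofList orig_nodes) i))
      = (fun i => !decide (i ∈ orig_nodes)) := by
    funext i
    simp [PySem.Set.contains, PySem.Set.mem_ofList]
  rw [hkey, sorted_bool_key (fun i => !decide (i ∈ orig_nodes)) r]
  simp only [Bool.not_not]
  rw [show (PySem.Dict.ofList (PySem.List.enumerate
        (r.filter (fun i => decide (i ∈ orig_nodes)) ++ r.filter (fun i => !decide (i ∈ orig_nodes))) 1)
        : PySem.Dict Int Int)
      = PySem.Dict.empty.update (PySem.List.enumerate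
        (r.filter (fun i => decide (i ∈ orig_nodes)) ++ r.filter (fun i => !decide (i ∈ orig_nodes))) 1)
      from rfl]
  rw [dict_update_fresh _ _ (by intro p hp; rfl) (nodup_enumerate_keys _ 1)]
  rfl
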